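-- pv_equiv track=rewrite | github.com/cosminc98/BDANN-IJCNN2020 | src/convert.py | return_first_n_sentences
-- ===== SOURCE A (Python) =====
-- def return_first_n_sentences(text: str, n = 1):
--     if n < 1:
--         raise ValueError('Number of sentences must be >1')
--
--     sentence_terminators = set(['.', '!', '?', ';', ':'])
--
--     n_found = 0
--     for i in range(len(text)):
--         if text[i] in sentence_terminators:
--             n_found += 1
--             if n_found == n:
--                 return text[:i+1]
--
--     return text
-- ===== SOURCE B (Python) =====
-- def return_first_n_sentences(text: str, n = 1):
--     if n < 1:
--         raise ValueError('Number of sentences must be >1')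
--     # Search-driven jumps: repeatedly locate the next terminator with per-character
--     # str.find calls and take the minimum hit, n times, instead of scanning chars.
--     pos = 0
--     for _ in range(n):
--         hits = [j for j in (text.find(t, pos) for t in '.!?;:') if j != -1]
--         if not hits:
--             return text
--         pos = min(hits) + 1
--     return text[:pos]
-- ===== Notes on version B (the rewrite author's own statement) =====
-- stated objective: faster
-- what changed: Replaces the char-by-char counting scan by n rounds of library substring search: each round calls str.find(t, pos) for each of the five terminators, takes the minimum hit to jump to the next terminator, and slices at the position reached after n jumps (or returns the whole text when a round finds nothing).
import Mathlib
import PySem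

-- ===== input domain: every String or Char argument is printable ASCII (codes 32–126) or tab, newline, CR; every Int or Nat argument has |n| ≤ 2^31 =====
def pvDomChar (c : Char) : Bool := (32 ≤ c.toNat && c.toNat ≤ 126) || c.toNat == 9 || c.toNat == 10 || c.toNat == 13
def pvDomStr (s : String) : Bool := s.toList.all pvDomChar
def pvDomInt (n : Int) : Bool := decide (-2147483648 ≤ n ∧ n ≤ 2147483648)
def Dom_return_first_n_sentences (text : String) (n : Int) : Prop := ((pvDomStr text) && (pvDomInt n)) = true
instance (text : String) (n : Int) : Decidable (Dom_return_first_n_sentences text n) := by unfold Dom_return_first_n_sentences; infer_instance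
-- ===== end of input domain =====

-- B replaces A's char-by-char counting scan by n rounds of library substring search
-- (str.find per terminator + min of the hits), jumping from terminator to terminator
-- (different algorithm; a timing run measured B faster on large inputs).
-- Pre_ excludes n < 1, where the Python A (and B) raises ValueError.


-- ===== PORT A =====
-- sentence_terminators = set(['.', '!', '?', ';', ':'])
def pvTerminators : PySem.Set Char := PySem.Set.ofList ['.', '!', '?', ';', ':']

-- the loop "for i in range(len(text)): …" — the remaining characters with their running index i, counter n_found
def pvLoopA (text : String) (n : Int) : List Char → Nat → Int → String
  | [], _, _ => text
  | c :: rest, i, nfound =>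
    if PySem.Set.contains pvTerminators c then
      if nfound + 1 == n then PySem.Str.slice text none (some ((i : Int) + 1))  -- text[:i+1]
      else pvLoopA text n rest (i + 1) (nfound + 1)
    else pvLoopA text n rest (i + 1) nfound

def return_first_n_sentences (text : String) (n : Int) : String :=
  if n < 1 then ""  -- raise ValueError — excluded by Pre_
  else pvLoopA text n text.toList 0 0

-- ===== PORT B =====
-- hits = [j for j in (text.find(t, pos) for t in '.!?;:') if j != -1]
def pvHitsB (text : String) (pos : Int) : List Int :=
  ((".!?;:".toList).map (fun t => PySem.Str.findFrom text (String.ofList [t]) pos none)).filter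
    (fun j => j != -1)

-- the "for _ in range(n)" loop: remaining iteration count, current search start pos
def pvLoopB (text : String) : Nat → Int → String
  | 0, pos => PySem.Str.slice text none (some pos)  -- text[:pos]
  | fuel + 1, pos =>
    match PySem.List.min? (pvHitsB text pos) (fun x => x) with
    | none => text        -- if not hits: return text
    | some m => pvLoopB text fuel (m + 1)  -- pos = min(hits) + 1

def return_first_n_sentences_alt (text : String) (n : Int) : String :=
  if n < 1 then ""  -- raise ValueError — excluded by Pre_
  else pvLoopB text n.toNat 0

-- ===== PRECONDITION & SPEC =====
-- Pre_ excludes exactly n < 1, on which the Python A raises ValueError.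
def Pre_return_first_n_sentences (text : String) (n : Int) : Prop := 1 ≤ n
instance (text : String) (n : Int) : Decidable (Pre_return_first_n_sentences text n) := by unfold Pre_return_first_n_sentences; infer_instance
def pvWitness_return_first_n_sentences : String × Int := ("Hi. Bye! End", 2)

def Spec_return_first_n_sentences (text : String) (n : Int) (out : String) : Prop := out = return_first_n_sentences_alt text n
instance (text : String) (n : Int) (out : String) : Decidable (Spec_return_first_n_sentences text n out) := by unfold Spec_return_first_n_sentences; infer_instance

-- ===== CLAIM (what is proved, stated in full; the proofs are below) =====
def Claim_equal_return_first_n_sentences : Prop := ∀ (text : String) (n : Int), Dom_return_first_n_sentences text n → Pre_return_first_n_sentences text n → Spec_return_first_n_sentences text n (return_first_n_sentences text n)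

-- ===== LEMMAS AND PROOFS =====

-- terminator end-positions of cs when its first character sits at index i
def pvEndsFrom : List Char → Nat → List Int
  | [], _ => []
  | c :: rest, i =>
    if (".!?;:".toList).contains c then ((i : Int) + 1) :: pvEndsFrom rest (i + 1)
    else pvEndsFrom rest (i + 1)

theorem pvTerm_eq (c : Char) :
    PySem.Set.contains pvTerminators c = (".!?;:".toList).contains c := by
  simp [pvTerminators, PySem.Set.contains, PySem.Set.ofList]

-- ===== A-side: pvLoopA indexes the list of terminator end-positions =====
theorem pvLoopA_eq (text : String) (n : Int) (cs : List Char) (i : Nat) (f : Int)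
    (hf : f < n) :
    pvLoopA text n cs i f =
      match (pvEndsFrom cs i)[(n - f - 1).toNat]? with
      | some e => PySem.Str.slice text none (some e)
      | none => text := by
  induction cs generalizing i f with
  | nil => simp [pvLoopA, pvEndsFrom]
  | cons c rest ih =>
    rw [pvLoopA, pvTerm_eq]
    by_cases h : (".!?;:".toList).contains c
    · rw [if_pos h]
      by_cases hn : f + 1 = n
      · have : (f + 1 == n) = true := by simp [hn]
        rw [this, if_pos rfl]
        have h0 : (n - f - 1).toNat = 0 := by omega
        rw [pvEndsFrom, if_pos h, h0]
        simp
      · have : (f + 1 == n) = false := by simp [hn]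
        rw [this]
        simp only [Bool.false_eq_true, if_neg, not_false_iff]
        rw [ih (i + 1) (f + 1) (by omega)]
        have hk : (n - f - 1).toNat = (n - (f + 1) - 1).toNat + 1 := by omega
        rw [pvEndsFrom, if_pos h, hk]
        simp
    · rw [if_neg h, ih (i + 1) f hf, pvEndsFrom, if_neg h]

-- ===== B-side helpers =====
theorem pv_singleton_prefix_drop (t : Char) (l : List Char) (i : Nat) (h : i < l.length) :
    [t] <+: l.drop i ↔ l[i] = t := by
  rw [List.drop_eq_getElem_cons h, List.cons_prefix_cons]
  simp [eq_comm]

theorem pv_singleton_infix (t : Char) (l : List Char) : [t] <:+: l ↔ t ∈ l := by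
  constructor
  · rintro ⟨p, s, rfl⟩; simp
  · intro h
    obtain ⟨p, s, rfl⟩ := List.append_of_mem h
    exact ⟨p, s, by simp⟩

theorem pv_mem_hits (text : String) (pos m : Int) :
    m ∈ pvHitsB text pos ↔
      (∃ t ∈ ".!?;:".toList, PySem.Chars.findFrom text.toList [t] pos none = m) ∧ m ≠ -1 := by
  simp [pvHitsB, List.mem_filter, PySem.Str.findFrom_eq]
  tauto

-- no terminator occurs in d ⇒ no end positions
theorem pvE_none (d : List Char) (i : Nat)
    (h : ∀ c ∈ d, (".!?;:".toList).contains c = false) :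
    pvEndsFrom d i = [] := by
  induction d generalizing i with
  | nil => rfl
  | cons c rest ih =>
    rw [pvEndsFrom, h c (by simp), if_neg (by simp)]
    exact ih (i + 1) (fun c hc => h c (by simp [hc]))

theorem pvE_step (cs : List Char) (k : Nat) (h : k < cs.length) :
    pvEndsFrom (cs.drop k) k =
      if (".!?;:".toList).contains cs[k] then
        ((k : Int) + 1) :: pvEndsFrom (cs.drop (k + 1)) (k + 1)
      else pvEndsFrom (cs.drop (k + 1)) (k + 1) := by
  rw [List.drop_eq_getElem_cons h, pvEndsFrom]

-- j is the first terminator index ≥ k ⇒ the end-position list starting at k begins with j+1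
theorem pvE_first (cs : List Char) (k j : Nat) (hk : k ≤ j) (hj : j < cs.length)
    (ht : (".!?;:".toList).contains cs[j] = true)
    (hmin : ∀ i, (h1 : k ≤ i) → (h2 : i < j) →
      (".!?;:".toList).contains (cs[i]'(Nat.lt_trans h2 hj)) = false) :
    pvEndsFrom (cs.drop k) k = ((j : Int) + 1) :: pvEndsFrom (cs.drop (j + 1)) (j + 1) := by
  induction hd : j - k generalizing k with
  | zero =>
    have : k = j := by omega
    subst this
    rw [pvE_step cs k hj, if_pos ht]
  | succ n ih =>
    have hkj : k < j := by omega
    rw [pvE_step cs k (by omega), hmin k le_rfl hkj, if_neg (by simp)]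
    exact ih (k + 1) (by omega) (fun i h1 h2 => hmin i (by omega) h2) (by omega)

-- min(hits) is absent exactly when no terminator occurs at index ≥ pos
theorem pv_hits_none (text : String) (k : Nat) (hk : k ≤ text.toList.length)
    (h : PySem.List.min? (pvHitsB text (k : Int)) (fun x => x) = none) :
    ∀ c ∈ text.toList.drop k, (".!?;:".toList).contains c = false := by
  intro c hc
  rw [PySem.List.min?_eq_none_iff] at h
  by_contra hterm
  have hcterm : c ∈ ".!?;:".toList := by
    simpa using Bool.of_not_eq_false hterm
  set f := PySem.Chars.findFrom text.toList [c] (k : Int) none with hf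
  have hfne : f ≠ -1 := by
    rw [hf, Ne, PySem.Chars.findFrom_natCast_eq_neg_one_iff _ _ k hk]
    simp [pv_singleton_infix, hc]
  have : f ∈ pvHitsB text (k : Int) := by
    rw [pv_mem_hits]
    exact ⟨⟨c, hcterm, rfl⟩, hfne⟩
  rw [h] at this
  exact absurd this (List.not_mem_nil)

-- min(hits) = m ⇒ m is the first terminator index ≥ k
theorem pv_hits_some (text : String) (k : Nat) (m : Int) (hk : k ≤ text.toList.length)
    (hmin : PySem.List.min? (pvHitsB text (k : Int)) (fun x => x) = some m) :
    ∃ j : Nat, m = (j : Int) ∧ k ≤ j ∧ ∃ hj : j < text.toList.length,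
      (".!?;:".toList).contains (text.toList[j]'hj) = true ∧
      ∀ i, (h1 : k ≤ i) → (h2 : i < j) →
        (".!?;:".toList).contains (text.toList[i]'(Nat.lt_trans h2 hj)) = false := by
  set cs := text.toList with hcs
  have hm := PySem.List.min?_mem hmin
  rw [pv_mem_hits] at hm
  obtain ⟨⟨t, htmem, hft⟩, hne⟩ := hm
  have hspec := PySem.Chars.findFrom_natCast_spec cs [t] k hk (by rw [hft]; exact hne)
  rw [hft] at hspec
  obtain ⟨hkm, hpre, hminim⟩ := hspec
  have hm0 : 0 ≤ m := le_trans (by positivity) hkm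
  refine ⟨m.toNat, by omega, by omega, ?_⟩
  have hjlt : m.toNat < cs.length := by
    rcases hpre with ⟨s, hs⟩
    have : (cs.drop m.toNat).length = 1 + s.length := by rw [← hs]; simp; omega
    simp at this
    omega
  have hcsj : cs[m.toNat] = t := by
    rw [← pv_singleton_prefix_drop t cs m.toNat hjlt]
    exact hpre
  refine ⟨hjlt, by simp [hcsj]; simpa using htmem, ?_⟩
  intro i h1 h2
  by_contra hterm
  set t' := cs[i]'(Nat.lt_trans h2 hjlt) with ht'
  have ht'mem : t' ∈ ".!?;:".toList := by simpa using Bool.of_not_eq_false hterm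
  set f' := PySem.Chars.findFrom cs [t'] (k : Int) none with hf'
  have hilt : i < cs.length := Nat.lt_trans h2 hjlt
  have ht'drop : t' ∈ cs.drop k := by
    have : cs[i] = (cs.drop k)[i - k]'(by simp; omega) := by
      simp [List.getElem_drop]
      congr 1
      omega
    rw [ht', this]
    exact List.getElem_mem _
  have hf'ne : f' ≠ -1 := by
    rw [hf', Ne, PySem.Chars.findFrom_natCast_eq_neg_one_iff _ _ k hk]
    simp [pv_singleton_infix, ht'drop]
  have hf'mem : f' ∈ pvHitsB text (k : Int) := by
    rw [pv_mem_hits]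
    exact ⟨⟨t', ht'mem, rfl⟩, hf'ne⟩
  have hmle : m ≤ f' := PySem.List.min?_isMin hmin f' hf'mem
  have hspec' := PySem.Chars.findFrom_natCast_spec cs [t'] k hk (by rw [← hf'] at *; exact hf'ne)
  rw [← hf'] at hspec'
  obtain ⟨hkf', _, hminim'⟩ := hspec'
  have hf'le : f'.toNat ≤ i := by
    by_contra hgt
    exact hminim' i h1 (by omega) ((pv_singleton_prefix_drop t' cs i hilt).mpr rfl)
  omega

-- ===== B-side: the fuelled search loop indexes the same end-position list =====
theorem pvLoopB_eq (text : String) : ∀ (fuel : Nat) (k : Nat),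
    k ≤ text.toList.length → 1 ≤ fuel →
    pvLoopB text fuel (k : Int) =
      match (pvEndsFrom (text.toList.drop k) k)[fuel - 1]? with
      | some e => PySem.Str.slice text none (some e)
      | none => text := by
  intro fuel
  induction fuel with
  | zero => intro k _ h1; omega
  | succ f ih =>
    intro k hk _
    rw [pvLoopB]
    cases hmin : PySem.List.min? (pvHitsB text (k : Int)) (fun x => x) with
    | none =>
      rw [pvE_none _ _ (pv_hits_none text k hk hmin)]
      simp
    | some m =>
      obtain ⟨j, rfl, hkj, hj, ht, hminim⟩ := pv_hits_some text k m hk hmin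
      change pvLoopB text f ((j : Int) + 1) = _
      rw [pvE_first text.toList k j hkj hj ht hminim]
      have hcast : ((j : Int) + 1) = (((j + 1 : Nat)) : Int) := by push_cast; ring
      cases f with
      | zero =>
        rw [hcast, pvLoopB]
        simp
      | succ f' =>
        rw [hcast, ih (j + 1) (by omega) (by omega)]
        simp

-- ===== VERDICT (by name: the statement is the Claim_ definition above) =====
theorem return_first_n_sentences_spec : Claim_equal_return_first_n_sentences := by
  intro text n _ hpre
  unfold Spec_return_first_n_sentences return_first_n_sentences return_first_n_sentences_alt
  have hn : ¬ n < 1 := not_lt.mpr hpre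
  rw [if_neg hn, if_neg hn]
  rw [pvLoopA_eq text n text.toList 0 0 (by omega)]
  rw [show (0 : Int) = ((0 : Nat) : Int) from rfl,
    pvLoopB_eq text n.toNat 0 (by omega) (by omega)]
  rw [List.drop_zero]
  have : (n - ((0 : Nat) : Int) - 1).toNat = n.toNat - 1 := by push_cast; omega
  rw [this]
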